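-- pv_equiv track=rewrite | github.com/MinTreesLearn/ML | Codeforces Submissions/1284/C/178277484.py | real_solve
-- ===== SOURCE A (Python) =====
-- def real_solve(n, mod):
--
--   fact = [1]
--
--   for i in range(1, n + 2):
--
--     fact.append(fact[-1] * i % mod)
--
--
--
--   ans = 0
--
--   for i in range(n):
--
--     n_start_base = i + 1
--
--     base_element = fact[i + 1]
--
--     inc = n - n_start_base
--
--     cur = fact[inc] * base_element
--
--
--
--     cur *= (n - i) ** 2
--
--     cur %= mod
--
--     ans += cur
--
--
--
--   return ans % mod
-- ===== SOURCE B (Python) =====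
-- def real_solve(n, mod):
--     # phase 1: push each forward product a! with its interval weight (n-a+1)^2 attached
--     stack = []
--     f = 1
--     for a in range(1, n + 1):
--         f = f * a % mod
--         stack.append(f * (n - a + 1) ** 2 % mod)
--     # phase 2: pop back-to-front while growing the suffix factorial g = d!
--     ans, g, d = 0, 1, 0
--     while stack:
--         ans += stack.pop() * g % mod
--         d += 1
--         g = g * d % mod
--     return ans % mod
-- ===== Notes on version B (the rewrite author's own statement) =====
-- stated objective: alternative
-- what changed: B eliminates A's double-indexed factorial table (fact[i+1], fact[n-1-i] lookups): phase 1 pushes each forward product a! with its weight (n-a+1)^2 already attached onto a stack, phase 2 pops the stack back-to-front while growing the suffix factorial as a running product, so the summation does no list indexing at all and the second factorial is never stored.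
import Mathlib
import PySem

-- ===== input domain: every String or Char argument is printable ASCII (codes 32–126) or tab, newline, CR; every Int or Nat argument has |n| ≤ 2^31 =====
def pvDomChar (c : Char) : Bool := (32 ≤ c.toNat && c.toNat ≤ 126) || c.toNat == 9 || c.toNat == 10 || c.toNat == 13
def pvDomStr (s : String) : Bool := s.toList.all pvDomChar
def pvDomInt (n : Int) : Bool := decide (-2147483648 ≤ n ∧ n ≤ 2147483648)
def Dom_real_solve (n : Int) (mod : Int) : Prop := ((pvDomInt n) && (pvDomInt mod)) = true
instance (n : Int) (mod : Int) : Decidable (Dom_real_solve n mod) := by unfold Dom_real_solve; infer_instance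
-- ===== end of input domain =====

-- B replaces A's double-indexed factorial table by a stack of weight-attached forward products consumed back-to-front against a running suffix factorial (alternative decomposition, similar cost). Return value only; neither version mutates its arguments.


-- ===== PORT A =====
-- Python's list with O(1) append is Array (push); fact[-1] on this always-nonempty list is
-- its last element (back!), and the two loop lookups have nonnegative in-range indices
-- (0 ≤ i+1, 0 ≤ n-1-i < len for i in range(n), proved below), so toNat/getElem! is exact here.
def real_solve (n : Int) (mod : Int) : Int :=
  let fact := (PySem.List.pyRange 1 (n + 2) 1).foldl
    (fun (fact : Array Int) i => fact.push (PySem.Int.mod (fact.back! * i) mod)) #[(1 : Int)]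
  let ans := (PySem.List.pyRange 0 n 1).foldl
    (fun ans i =>
      let n_start_base := i + 1
      let base_element := fact[Int.toNat (i + 1)]!
      let inc := n - n_start_base
      let cur := fact[Int.toNat inc]! * base_element
      let cur := PySem.Int.mod (cur * (n - i) ^ 2) mod
      ans + cur) 0
  PySem.Int.mod ans mod

-- ===== PORT B =====
-- phase 2's 'while stack: … stack.pop()' is the recursion popLoop on (ans, g, d):
-- pop on a nonempty Python list reads the last element (back!) and drops it (Array.pop),
-- so this is step-for-step Source B
def popLoop (mod : Int) (stack : Array Int) (ans g d : Int) : Int :=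
  if h : stack.size = 0 then ans
  else
    let t := stack.back!
    let rest := stack.pop
    popLoop mod rest (ans + PySem.Int.mod (t * g) mod)
      (PySem.Int.mod (g * (d + 1)) mod) (d + 1)
termination_by stack.size
decreasing_by
  simp [Array.size_pop]
  omega

def real_solve_alt (n : Int) (mod : Int) : Int :=
  let p := (PySem.List.pyRange 1 (n + 1) 1).foldl
    (fun (p : Int × Array Int) a =>
      let f := PySem.Int.mod (p.1 * a) mod
      (f, p.2.push (PySem.Int.mod (f * (n - a + 1) ^ 2) mod))) (1, #[])
  PySem.Int.mod (popLoop mod p.2 0 1 0) mod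

-- ===== PRECONDITION & SPEC =====
-- Python's '%' raises ZeroDivisionError for mod = 0 (in A and in B alike)
def Pre_real_solve (_n : Int) (mod : Int) : Prop := mod ≠ 0
instance (n : Int) (mod : Int) : Decidable (Pre_real_solve n mod) := by unfold Pre_real_solve; infer_instance
def pvWitness_real_solve : Int × Int := (5, 7)

def Spec_real_solve (n : Int) (mod : Int) (out : Int) : Prop := out = real_solve_alt n mod
instance (n : Int) (mod : Int) (out : Int) : Decidable (Spec_real_solve n mod out) := by unfold Spec_real_solve; infer_instance

-- ===== CLAIM (what is proved, stated in full; the proofs are below) =====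
def Claim_equal_real_solve : Prop := ∀ (n : Int) (mod : Int), Dom_real_solve n mod → Pre_real_solve n mod → Spec_real_solve n mod (real_solve n mod)

-- ===== LEMMAS AND PROOFS =====

-- the running product reduced mod m at each step (A's table entries, B's f and g)
def pf (m : Int) : Nat → Int
  | 0 => 1
  | k + 1 => PySem.Int.mod (pf m k * (k + 1)) m

-- reducing the left factor first does not change a Python-mod product (positive divisor)
lemma pymod_mul_left_pos (m x y : Int) (hm : 0 < m) :
    PySem.Int.mod (PySem.Int.mod x m * y) m = PySem.Int.mod (x * y) m := by
  rw [PySem.Int.mod_eq_emod_of_pos hm, PySem.Int.mod_eq_emod_of_pos hm,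
    PySem.Int.mod_eq_emod_of_pos hm]
  conv_lhs => rw [Int.mul_emod, Int.emod_emod_of_dvd x dvd_rfl]
  rw [← Int.mul_emod]

-- the same for every nonzero divisor (negative case by mod_neg_neg reflection)
lemma pymod_mul_left (m x y : Int) (hm : m ≠ 0) :
    PySem.Int.mod (PySem.Int.mod x m * y) m = PySem.Int.mod (x * y) m := by
  rcases lt_trichotomy m 0 with hneg | h0 | hpos
  · have hrefl : ∀ z : Int, PySem.Int.mod z m = -PySem.Int.mod (-z) (-m) := by
      intro z
      have := PySem.Int.mod_neg_neg (-z) (-m)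
      simp only [neg_neg] at this
      exact this
    rw [hrefl (PySem.Int.mod x m * y), hrefl (x * y)]
    congr 1
    have hx : -(PySem.Int.mod x m * y) = PySem.Int.mod (-x) (-m) * y := by
      rw [hrefl x]; ring
    rw [hx, pymod_mul_left_pos (-m) (-x) y (by omega)]
    congr 1
    ring
  · exact absurd h0 hm
  · exact pymod_mul_left_pos m x y hpos

-- A's first loop builds exactly the table of pf-values
lemma fact_build (m : Int) (N : Nat) :
    (PySem.List.pyRange 1 ((N : Int) + 1) 1).foldl
      (fun (fact : Array Int) i => fact.push (PySem.Int.mod (fact.back! * i) m)) #[(1 : Int)]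
    = ((List.range (N + 1)).map (pf m)).toArray := by
  induction N with
  | zero => simp [PySem.List.pyRange_one_eq_nil, pf]
  | succ N ih =>
    have hsplit : PySem.List.pyRange 1 (((N : Int) + 1) + 1) 1
        = PySem.List.pyRange 1 ((N : Int) + 1) 1 ++ [(N : Int) + 1] :=
      PySem.List.pyRange_one_succ_right (by omega)
    push_cast
    rw [hsplit, List.foldl_append, ih, List.foldl_cons, List.foldl_nil]
    have hback : (((List.range (N + 1)).map (pf m)).toArray).back! = pf m N := by
      simp [List.range_succ]
    rw [hback]
    have hpf : PySem.Int.mod (pf m N * ((N : Int) + 1)) m = pf m (N + 1) := by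
      simp only [pf]
    rw [hpf]
    simp [List.range_succ]

-- index into the table
lemma fact_get (m : Int) (M : Nat) (k : Nat) (h : k < M) :
    (((List.range M).map (pf m)).toArray)[k]! = pf m k := by
  rw [getElem!_pos (((List.range M).map (pf m)).toArray) k (by simpa using h)]
  simp

-- B's first loop carries (f, stack): f is the pf-chain, the stack its weighted copies
lemma stack_build (m n : Int) (N : Nat) :
    (PySem.List.pyRange 1 ((N : Int) + 1) 1).foldl
      (fun (p : Int × Array Int) a =>
        let f := PySem.Int.mod (p.1 * a) m
        (f, p.2.push (PySem.Int.mod (f * (n - a + 1) ^ 2) m))) (1, #[])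
    = (pf m N, (((List.range N).map
        (fun j => PySem.Int.mod (pf m (j + 1) * (n - (j : Int)) ^ 2) m))).toArray) := by
  induction N with
  | zero => simp [PySem.List.pyRange_one_eq_nil, pf]
  | succ N ih =>
    have hsplit : PySem.List.pyRange 1 (((N : Int) + 1) + 1) 1
        = PySem.List.pyRange 1 ((N : Int) + 1) 1 ++ [(N : Int) + 1] :=
      PySem.List.pyRange_one_succ_right (by omega)
    push_cast
    rw [hsplit, List.foldl_append, ih, List.foldl_cons, List.foldl_nil]
    have hpf : PySem.Int.mod (pf m N * ((N : Int) + 1)) m = pf m (N + 1) := by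
      simp only [pf]
    dsimp only
    rw [hpf]
    congr 1
    have harg : n - ((N : Int) + 1) + 1 = n - (N : Int) := by ring
    rw [harg]
    simp [List.range_succ]

-- one pop step, seen from the back of the stack
lemma popLoop_concat (m : Int) (l : List Int) (t ans g d : Int) :
    popLoop m ((l ++ [t]).toArray) ans g d
      = popLoop m l.toArray (ans + PySem.Int.mod (t * g) m) (PySem.Int.mod (g * (d + 1)) m) (d + 1) := by
  rw [popLoop]
  simp

-- the pop phase as a sum: entry j is consumed against the suffix factorial pf (d + (N-1-j))
lemma popLoop_map (m : Int) (w : Nat → Int) (N : Nat) : ∀ (d : Nat) (ans : Int),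
    popLoop m (((List.range N).map w).toArray) ans (pf m d) ((d : Nat) : Int)
      = ans + ((List.range N).map
          (fun j => PySem.Int.mod (w j * pf m (d + (N - 1 - j))) m)).sum := by
  induction N with
  | zero =>
    intro d ans
    rw [popLoop]
    simp
  | succ N ih =>
    intro d ans
    rw [List.range_succ, List.map_append, List.map_cons, List.map_nil, popLoop_concat]
    have hpf : PySem.Int.mod (pf m d * (((d : Nat) : Int) + 1)) m = pf m (d + 1) := by
      simp only [pf]
    have hd1 : ((d : Nat) : Int) + 1 = (((d + 1 : Nat)) : Int) := by push_cast; ring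
    rw [hd1] at hpf ⊢
    rw [hpf, ih (d + 1)]
    have hmap : (List.range N).map (fun j => PySem.Int.mod (w j * pf m ((d + 1) + (N - 1 - j))) m)
        = (List.range N).map (fun j => PySem.Int.mod (w j * pf m (d + (N + 1 - 1 - j))) m) := by
      apply List.map_congr_left
      intro j hj
      have := List.mem_range.mp hj
      rw [show (d + 1) + (N - 1 - j) = d + (N + 1 - 1 - j) by omega]
    rw [hmap, List.map_append, List.map_cons, List.map_nil,
      List.sum_append, List.sum_cons, List.sum_nil]
    rw [show N + 1 - 1 - N = 0 by omega, show d + 0 = d by omega]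
    ring

-- ===== VERDICT (by name: the statement is the Claim_ definition above) =====
theorem real_solve_spec : Claim_equal_real_solve := by
  intro n m _ hm
  unfold Spec_real_solve real_solve real_solve_alt
  by_cases hn : n ≤ 0
  · rw [PySem.List.pyRange_one_eq_nil hn, PySem.List.pyRange_one_eq_nil (by omega : n + 1 ≤ 1)]
    simp only [List.foldl_nil]
    rw [popLoop]
    simp
  · replace hn : 0 < n := by omega
    set N := n.toNat with hNdef
    have hnN : n = (N : Int) := by omega
    have hbuildA := fact_build m (N + 1)
    have hbuildB := stack_build m n N
    rw [show ((N + 1 : Nat) : Int) + 1 = n + 2 by omega] at hbuildA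
    rw [show ((N : Nat) : Int) + 1 = n + 1 by omega] at hbuildB
    rw [hbuildA, hbuildB]
    dsimp only
    congr 1
    -- A's summing loop as a sum over range N
    rw [PySem.List.foldl_add, hnN, PySem.List.pyRange_zero_natCast, List.map_map, zero_add]
    -- B's pop loop as a sum over range N (g starts at 1 = pf m 0, d at 0)
    have hpop := popLoop_map m
      (fun j => PySem.Int.mod (pf m (j + 1) * (n - (j : Int)) ^ 2) m) N 0 0
    rw [show pf m 0 = (1 : Int) from rfl] at hpop
    simp only [Nat.cast_zero, zero_add] at hpop
    rw [hnN] at hpop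
    rw [hpop]
    congr 1
    apply List.map_congr_left
    intro j hj
    have hjN : j < N := List.mem_range.mp hj
    simp only [Function.comp]
    rw [show Int.toNat (((N : Nat) : Int) - ((j : Int) + 1)) = N - 1 - j by omega,
        show Int.toNat (((j : Int)) + 1) = j + 1 by omega]
    rw [fact_get m (N + 1 + 1) (N - 1 - j) (by omega),
        fact_get m (N + 1 + 1) (j + 1) (by omega)]
    rw [pymod_mul_left m _ _ hm]
    congr 1
    ring
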